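-- pv_equiv track=rewrite | github.com/PythonHugs/AdventOfCode2023 | puzzle_3/part_2_puzzle_3.py | check_indices_on_same_line
-- ===== SOURCE A (Python) =====
-- def check_indices_on_same_line(indices, line):
--     adjacent_indices = []
--     if indices[0] != 0:
--         try:
--             int(line[indices[0] - 1])
--             target_index = indices[0] - 1
--             while target_index >= 0:
--                 try:
--                     int(line[target_index])
--                     adjacent_indices.insert(0, line[target_index])
--                     target_index -= 1
--                 except ValueError:
--                     break
--         except ValueError:
--             pass
--     adjacent_indices.append('.')  # account for numbers on either side of the gear
--     if indices[-1] != len(line) - 1: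
--         try:
--             int(line[indices[-1] + 1])
--             target_index = indices[-1] + 1
--             while target_index <= len(line) - 1:
--                 try:
--                     int(line[target_index])
--                     adjacent_indices.append(line[target_index])
--                     target_index += 1
--                 except ValueError:
--                     break
--         except ValueError:
--             pass
--     return adjacent_indices
-- ===== SOURCE B (Python) =====
-- def check_indices_on_same_line(indices, line):
--     left = line[:indices[0]]
--     right = line[indices[-1] + 1:]
--     i = len(left)
--     while i > 0 and left[i - 1].isdecimal():
--         i -= 1
--     j = 0
--     while j < len(right) and right[j].isdecimal():
--         j += 1
--     return list(left[i:]) + ['.'] + list(right[:j])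
-- ===== Notes on version B (the rewrite author's own statement) =====
-- stated objective: simpler
-- what changed: Replaces the index-walking loops with try/except-int digit probes and front-insertion by slicing the line at the gear and taking the trailing digit run of the left slice and the leading digit run of the right slice, which removes all boundary guards and exception handling.
-- intended difference: On in-range negative first/last indices Python's wraparound makes A's backward walk skip the left digit run (negative start index with a digit at the wrapped left neighbour) or makes A's forward walk run past the end of the line and re-read it from position 0 (all-digit suffix with a digit at position 0), so A returns a truncated or wrapped run; B returns the contiguous digit runs adjacent to the gear slice, which is the intended value. — e.g. on check_indices_on_same_line([-1], "9*"): A returns [".", "9"], B returns ["9", ".", "9"]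
import Mathlib
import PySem

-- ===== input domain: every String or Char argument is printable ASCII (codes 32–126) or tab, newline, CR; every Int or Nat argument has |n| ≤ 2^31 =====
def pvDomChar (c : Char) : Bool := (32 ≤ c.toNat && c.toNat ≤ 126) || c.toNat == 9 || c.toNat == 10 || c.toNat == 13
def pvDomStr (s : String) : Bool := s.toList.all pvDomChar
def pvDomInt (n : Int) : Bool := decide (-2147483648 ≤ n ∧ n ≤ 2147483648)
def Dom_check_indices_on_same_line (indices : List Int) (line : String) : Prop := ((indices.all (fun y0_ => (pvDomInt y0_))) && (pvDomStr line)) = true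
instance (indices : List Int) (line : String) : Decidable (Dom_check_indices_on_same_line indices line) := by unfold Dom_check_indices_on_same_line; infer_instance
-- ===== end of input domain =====

-- B replaces A's index-walking loops with try/except digit probes by slicing the line at the
-- gear and taking the trailing digit run of the left slice and the leading digit run of the
-- right slice (objective: simpler structure, same O(n) cost); on in-range negative indices
-- (Python wraparound) A's walk skips or wraps and B's slice-run value differs — see D_ below.

-- ===== PORT A =====
-- while target_index >= 0: try int(line[target_index]); adjacent.insert(0, …); target_index -= 1
-- (int(c) on a single printable-ASCII char succeeds exactly for '0'..'9', modelled by Char.isDigit)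
def pvLeftLoop (cs : List Char) : Nat → List Char → List Char
  | 0, acc =>
    match PySem.List.pyGet? cs 0 with
    | none => acc
    | some c => if c.isDigit then c :: acc else acc
  | t + 1, acc =>
    match PySem.List.pyGet? cs (Int.ofNat (t + 1)) with
    | none => acc
    | some c => if c.isDigit then pvLeftLoop cs t (c :: acc) else acc

-- while target_index <= len(line) - 1: try int(line[target_index]); adjacent.append(…); target_index += 1
def pvRightLoop (cs : List Char) (n : Int) : Nat → Int → List Char → List Char
  | 0, _, acc => acc
  | fuel + 1, t, acc =>
    if t ≤ n - 1 then
      match PySem.List.pyGet? cs t with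
      | none => acc
      | some c => if c.isDigit then pvRightLoop cs n fuel (t + 1) (acc ++ [c]) else acc
    else acc

def check_indices_on_same_line (indices : List Int) (line : String) : List String :=
  let cs := line.toList
  let n : Int := cs.length
  let i0 := (PySem.List.pyGet? indices 0).getD 0      -- indices[0]; none = IndexError, excluded by Pre_
  let i1 := (PySem.List.pyGet? indices (-1)).getD 0   -- indices[-1]
  let leftPart : List Char :=
    if i0 ≠ 0 then
      match PySem.List.pyGet? cs (i0 - 1) with
      | none => []                                    -- IndexError, excluded by Pre_
      | some c =>
        if c.isDigit then
          if i0 - 1 < 0 then []                       -- while guard target_index >= 0 fails at entry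
          else pvLeftLoop cs (i0 - 1).toNat []
        else []                                       -- ValueError: pass
    else []
  let rightPart : List Char :=
    if i1 ≠ n - 1 then
      match PySem.List.pyGet? cs (i1 + 1) with
      | none => []                                    -- IndexError, excluded by Pre_
      | some c =>
        if c.isDigit then pvRightLoop cs n ((n - (i1 + 1)).toNat + 1) (i1 + 1) []
        else []                                       -- ValueError: pass
    else []
  (leftPart.map (fun c => String.ofList [c])) ++ ["."] ++ (rightPart.map (fun c => String.ofList [c]))

-- ===== PORT B =====
-- while i > 0 and left[i-1].isdecimal(): i -= 1   (index i-1 is in range by the guard, so getD is exact)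
def pvBLeft (left : List Char) : Nat → Nat
  | 0 => 0
  | i + 1 => if (left.getD i ' ').isDigit then pvBLeft left i else i + 1

-- while j < len(right) and right[j].isdecimal(): j += 1  (fuel = number of remaining positions)
def pvBRightAux (right : List Char) : Nat → Nat → Nat
  | 0, j => j
  | fuel + 1, j =>
    if j < right.length then
      if (right.getD j ' ').isDigit then pvBRightAux right fuel (j + 1) else j
    else j

def pvBRight (right : List Char) (j : Nat) : Nat := pvBRightAux right (right.length - j) j

def check_indices_on_same_line_alt (indices : List Int) (line : String) : List String :=
  let cs := line.toList
  let i0 := (PySem.List.pyGet? indices 0).getD 0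
  let i1 := (PySem.List.pyGet? indices (-1)).getD 0
  let left := PySem.List.slice cs none (some i0)          -- line[:indices[0]]
  let right := PySem.List.slice cs (some (i1 + 1)) none   -- line[indices[-1] + 1:]
  let i := pvBLeft left left.length
  let j := pvBRight right 0
  ((left.drop i) ++ ['.'] ++ (right.take j)).map (fun c => String.ofList [c])

-- ===== PRECONDITION & SPEC =====
-- Pre_ is exactly the set of inputs on which the Python A returns normally: a nonempty index
-- list whose first entry is 0 or makes line[indices[0]-1] a valid (possibly negative) Python
-- index, and whose last entry is len(line)-1 or makes line[indices[-1]+1] a valid index;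
-- everywhere else A raises IndexError.
def Pre_check_indices_on_same_line (indices : List Int) (line : String) : Prop :=
  indices ≠ [] ∧
  (indices.headD 0 = 0 ∨
    (-(line.toList.length : Int) ≤ indices.headD 0 - 1 ∧ indices.headD 0 - 1 < (line.toList.length : Int))) ∧
  (indices.getLastD 0 = (line.toList.length : Int) - 1 ∨
    (-(line.toList.length : Int) ≤ indices.getLastD 0 + 1 ∧ indices.getLastD 0 + 1 < (line.toList.length : Int)))
instance (indices : List Int) (line : String) : Decidable (Pre_check_indices_on_same_line indices line) := by
  unfold Pre_check_indices_on_same_line; infer_instance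

def pvWitness_check_indices_on_same_line : List Int × String := ([2], "12*34")

-- On in-range NEGATIVE first/last indices Python's wraparound makes A return an accidental value:
-- a negative first index whose wrapped left neighbour is a digit makes A's backward walk skip the
-- left digit run entirely, and a negative last index whose suffix is all digits followed by a digit
-- at position 0 makes A's forward walk wrap past the end of the line and re-read it from the start;
-- B returns the contiguous digit runs adjacent to the gear slice, which is the intended value.
def D_check_indices_on_same_line (indices : List Int) (line : String) : Prop :=
  (indices.headD 0 < 0 ∧ -(line.toList.length : Int) ≤ indices.headD 0 - 1 ∧
    (line.toList.getD ((line.toList.length : Int) + indices.headD 0 - 1).toNat ' ').isDigit = true) ∨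
  (indices.getLastD 0 + 1 < 0 ∧ -(line.toList.length : Int) ≤ indices.getLastD 0 + 1 ∧
    (line.toList.drop ((line.toList.length : Int) + indices.getLastD 0 + 1).toNat).all Char.isDigit = true ∧
    (line.toList.headD ' ').isDigit = true)
instance (indices : List Int) (line : String) : Decidable (D_check_indices_on_same_line indices line) := by
  unfold D_check_indices_on_same_line; infer_instance

def Spec_check_indices_on_same_line (indices : List Int) (line : String) (out : List String) : Prop := ¬ D_check_indices_on_same_line indices line → out = check_indices_on_same_line_alt indices line
instance (indices : List Int) (line : String) (out : List String) : Decidable (Spec_check_indices_on_same_line indices line out) := by unfold Spec_check_indices_on_same_line; infer_instance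

def pvDiffWitness_check_indices_on_same_line : List Int × String := ([-1], "9*")
def pvDiffWitnessOut_check_indices_on_same_line : (List String) × (List String) := ([".", "9"], ["9", ".", "9"])

-- ===== CLAIM (what is proved, stated in full; the proofs are below) =====
def Claim_unchanged_check_indices_on_same_line : Prop := ∀ (indices : List Int) (line : String), Dom_check_indices_on_same_line indices line → Pre_check_indices_on_same_line indices line → Spec_check_indices_on_same_line indices line (check_indices_on_same_line indices line)
def Claim_changed_check_indices_on_same_line : Prop := Dom_check_indices_on_same_line (pvDiffWitness_check_indices_on_same_line.1) (pvDiffWitness_check_indices_on_same_line.2) ∧ Pre_check_indices_on_same_line (pvDiffWitness_check_indices_on_same_line.1) (pvDiffWitness_check_indices_on_same_line.2) ∧ D_check_indices_on_same_line (pvDiffWitness_check_indices_on_same_line.1) (pvDiffWitness_check_indices_on_same_line.2) ∧ check_indices_on_same_line (pvDiffWitness_check_indices_on_same_line.1) (pvDiffWitness_check_indices_on_same_line.2) = pvDiffWitnessOut_check_indices_on_same_line.1 ∧ check_indices_on_same_line_alt (pvDiffWitness_check_indices_on_same_line.1) (pvDiffWitness_check_indices_on_same_line.2) = pvDiffWitnessOut_check_indices_on_same_line.2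 ∧ pvDiffWitnessOut_check_indices_on_same_line.1 ≠ pvDiffWitnessOut_check_indices_on_same_line.2
def Claim_exact_check_indices_on_same_line : Prop := ∀ (indices : List Int) (line : String), Dom_check_indices_on_same_line indices line → Pre_check_indices_on_same_line indices line → D_check_indices_on_same_line indices line → check_indices_on_same_line indices line ≠ check_indices_on_same_line_alt indices line

-- ===== LEMMAS AND PROOFS =====

-- A's left loop collects exactly the trailing digit run of cs.take (t+1), in order.
theorem pvLeftLoop_eq (cs : List Char) :
    ∀ (t : Nat), t < cs.length → ∀ acc,
      pvLeftLoop cs t acc = ((cs.take (t + 1)).reverse.takeWhile Char.isDigit).reverse ++ acc := by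
  intro t
  induction t with
  | zero =>
    intro h acc
    have hg : PySem.List.pyGet? cs (0 : Int) = some cs[0] := by
      simpa using PySem.List.pyGet?_ofNat (xs := cs) (n := 0) h
    simp only [pvLeftLoop, hg]
    have : cs.take 1 = [cs[0]] := by
      rw [List.take_add_one]; simp [List.getElem?_eq_getElem h]
    rw [this]
    by_cases hd : cs[0].isDigit <;> simp [hd, List.takeWhile]
  | succ t ih =>
    intro h acc
    have hg : PySem.List.pyGet? cs (Int.ofNat (t + 1)) = some cs[t + 1] := by
      simpa using PySem.List.pyGet?_ofNat (xs := cs) (n := t + 1) h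
    simp only [pvLeftLoop, hg]
    have hsplit : (cs.take (t + 2)).reverse = cs[t + 1] :: (cs.take (t + 1)).reverse := by
      rw [List.take_add_one, List.getElem?_eq_getElem h]; simp
    by_cases hd : cs[t + 1].isDigit
    · rw [if_pos hd, ih (by omega) (cs[t + 1] :: acc), hsplit]
      simp [List.takeWhile, hd]
    · rw [if_neg hd, hsplit]
      simp [List.takeWhile, hd]

-- B's left scan stops at length-minus-(trailing digit run) of the slice.
theorem pvBLeft_eq (L : List Char) :
    ∀ (i : Nat), i ≤ L.length →
      pvBLeft L i = i - ((L.take i).reverse.takeWhile Char.isDigit).length := by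
  intro i
  induction i with
  | zero => intro _; simp [pvBLeft]
  | succ i ih =>
    intro h
    have hi : i < L.length := by omega
    have hget : L.getD i ' ' = L[i] := List.getD_eq_getElem L ' ' hi
    have hsplit : (L.take (i + 1)).reverse = L[i] :: (L.take i).reverse := by
      rw [List.take_add_one, List.getElem?_eq_getElem hi]; simp
    have hlen : ((L.take i).reverse.takeWhile Char.isDigit).length ≤ i := by
      calc ((L.take i).reverse.takeWhile Char.isDigit).length
          ≤ (L.take i).reverse.length := (List.takeWhile_prefix _).length_le
        _ ≤ i := by simp
    simp only [pvBLeft, hget, hsplit]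
    by_cases hd : L[i].isDigit
    · rw [if_pos hd, ih (by omega)]
      simp [List.takeWhile, hd]
    · rw [if_neg hd]
      simp [List.takeWhile, hd]

-- dropping everything before the trailing digit run leaves exactly that run
theorem drop_trail_aux (R : List Char) (p : Char → Bool) :
    R.reverse.drop (R.length - (R.takeWhile p).length) = (R.takeWhile p).reverse := by
  have h : R.takeWhile p ++ R.dropWhile p = R := List.takeWhile_append_dropWhile
  have hrev : R.reverse = (R.dropWhile p).reverse ++ (R.takeWhile p).reverse := by
    conv_lhs => rw [← h]
    rw [List.reverse_append]
  have hlenR : (R.takeWhile p).length + (R.dropWhile p).length = R.length := by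
    have := congrArg List.length h
    simp only [List.length_append] at this
    exact this
  have hlen : R.length - (R.takeWhile p).length = (R.dropWhile p).reverse.length := by
    simp; omega
  rw [hrev, hlen, List.drop_left]

theorem drop_trail (L : List Char) (p : Char → Bool) :
    L.drop (L.length - (L.reverse.takeWhile p).length) = (L.reverse.takeWhile p).reverse := by
  have := drop_trail_aux L.reverse p
  simpa using this

-- B's left scan followed by the drop yields exactly the trailing digit run
theorem bleft_run (L : List Char) :
    L.drop (pvBLeft L L.length) = (L.reverse.takeWhile Char.isDigit).reverse := by
  rw [pvBLeft_eq L L.length le_rfl, List.take_length]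
  exact drop_trail L Char.isDigit

-- A's right loop from a nonnegative start collects the leading digit run of cs.drop t.
theorem pvRightLoop_eq (cs : List Char) :
    ∀ (fuel t : Nat), cs.length ≤ t + fuel → ∀ acc,
      pvRightLoop cs (cs.length : Int) fuel (Int.ofNat t) acc
        = acc ++ (cs.drop t).takeWhile Char.isDigit := by
  intro fuel
  induction fuel with
  | zero =>
    intro t hft acc
    have : cs.drop t = [] := List.drop_eq_nil_of_le (by omega)
    simp [pvRightLoop, this]
  | succ fuel ih =>
    intro t hft acc
    by_cases ht : t < cs.length
    · have hguard : (Int.ofNat t) ≤ (cs.length : Int) - 1 := by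
        simp only [Int.ofNat_eq_natCast]; omega
      have hg : PySem.List.pyGet? cs (Int.ofNat t) = some cs[t] := by
        simpa using PySem.List.pyGet?_ofNat (xs := cs) (n := t) ht
      have hdrop : cs.drop t = cs[t] :: cs.drop (t + 1) := List.drop_eq_getElem_cons ht
      simp only [pvRightLoop, if_pos hguard, hg]
      by_cases hd : cs[t].isDigit
      · rw [if_pos hd]
        have : (Int.ofNat t) + 1 = Int.ofNat (t + 1) := by simp
        rw [this, ih (t + 1) (by omega) (acc ++ [cs[t]]), hdrop]
        simp [List.takeWhile, hd]
      · rw [if_neg hd, hdrop]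
        simp [List.takeWhile, hd]
    · have : cs.drop t = [] := List.drop_eq_nil_of_le (by omega)
      have hguard : ¬ (Int.ofNat t) ≤ (cs.length : Int) - 1 := by
        simp only [Int.ofNat_eq_natCast]; omega
      simp only [pvRightLoop]
      rw [if_neg hguard]
      simp [this]

-- takeWhile over an append, both directions
theorem tw_append_not_all (l₁ l₂ : List Char) (p : Char → Bool) (h : l₁.all p = false) :
    (l₁ ++ l₂).takeWhile p = l₁.takeWhile p := by
  induction l₁ with
  | nil => simp at h
  | cons a t ih =>
    by_cases hp : p a
    · have ht : t.all p = false := by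
        simp [List.all_cons, hp] at h; simpa using h
      simp [List.takeWhile_cons, hp, ih ht]
    · simp [List.takeWhile_cons, hp]

theorem tw_append_all (l₁ l₂ : List Char) (p : Char → Bool) (h : l₁.all p = true) :
    (l₁ ++ l₂).takeWhile p = l₁ ++ l₂.takeWhile p := by
  induction l₁ with
  | nil => simp
  | cons a t ih =>
    have hall := List.all_eq_true.mp h
    have hp : p a := hall a (by simp)
    have ht : t.all p = true := List.all_eq_true.mpr (fun x hx => hall x (by simp [hx]))
    simp [List.takeWhile_cons, hp, ih ht]

-- A's right loop from a NEGATIVE in-range start: Python wraps, reading cs.drop (n+t) and then,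
-- once the index crosses 0, the whole line again from its start.
theorem pvRightLoopNeg (cs : List Char) :
    ∀ (fuel : Nat) (t : Int) (acc : List Char), -(cs.length : Int) ≤ t → t < 0 →
      (cs.length : Int) - t ≤ (fuel : Int) →
      pvRightLoop cs (cs.length : Int) fuel t acc
        = acc ++ ((cs.drop ((cs.length : Int) + t).toNat ++ cs).takeWhile Char.isDigit) := by
  intro fuel
  induction fuel with
  | zero => intro t acc hlo hneg hfuel; exfalso; omega
  | succ fuel ih =>
    intro t acc hlo hneg hfuel
    have hn1 : 1 ≤ cs.length := by omega
    have hguard : t ≤ (cs.length : Int) - 1 := by omega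
    set u : Nat := ((cs.length : Int) + t).toNat with hu
    have hun : u < cs.length := by omega
    have hg : PySem.List.pyGet? cs t = some cs[u] := by
      have hk : t = -(((-t).toNat : Nat) : Int) := by omega
      rw [hk, PySem.List.pyGet?_neg_natCast cs ((-t).toNat) (by omega) (by omega)]
      have : cs.length - (-t).toNat = u := by omega
      rw [this, List.getElem?_eq_getElem hun]
    have hdrop : cs.drop u = cs[u] :: cs.drop (u + 1) := List.drop_eq_getElem_cons hun
    simp only [pvRightLoop, if_pos hguard, hg]
    by_cases hd : cs[u].isDigit
    · rw [if_pos hd]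
      by_cases ht1 : t + 1 = 0
      · -- the walk crosses 0 and continues over the whole line
        have hz : t + 1 = Int.ofNat 0 := by simp [ht1]
        rw [hz, pvRightLoop_eq cs fuel 0 (by omega) (acc ++ [cs[u]])]
        have hu1 : u + 1 = cs.length := by omega
        rw [hdrop, hu1, List.drop_length]
        simp [List.takeWhile, hd]
      · rw [ih (t + 1) (acc ++ [cs[u]]) (by omega) (by omega) (by omega)]
        have huu : ((cs.length : Int) + (t + 1)).toNat = u + 1 := by omega
        rw [huu]
        have hR : (cs.drop u ++ cs).takeWhile Char.isDigit
            = cs[u] :: ((cs.drop (u + 1) ++ cs).takeWhile Char.isDigit) := by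
          rw [hdrop, List.cons_append, List.takeWhile_cons, if_pos hd]
        rw [hR]; simp
    · rw [if_neg hd]
      have hR : (cs.drop u ++ cs).takeWhile Char.isDigit = [] := by
        rw [hdrop, List.cons_append, List.takeWhile_cons, if_neg hd]
      rw [hR, List.append_nil]

-- B's right scan returns the length of the leading digit run past j.
theorem pvBRightAux_eq (R : List Char) :
    ∀ (fuel j : Nat), R.length ≤ j + fuel →
      pvBRightAux R fuel j = j + ((R.drop j).takeWhile Char.isDigit).length := by
  intro fuel
  induction fuel with
  | zero =>
    intro j h
    have : R.drop j = [] := List.drop_eq_nil_of_le (by omega)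
    simp [pvBRightAux, this]
  | succ fuel ih =>
    intro j h
    by_cases hj : j < R.length
    · have hget : R.getD j ' ' = R[j] := List.getD_eq_getElem R ' ' hj
      have hdrop : R.drop j = R[j] :: R.drop (j + 1) := List.drop_eq_getElem_cons hj
      simp only [pvBRightAux, if_pos hj, hget]
      by_cases hd : R[j].isDigit
      · rw [if_pos hd, ih (j + 1) (by omega), hdrop]
        simp [List.takeWhile, hd]; omega
      · rw [if_neg hd, hdrop]
        simp [List.takeWhile, hd]
    · have : R.drop j = [] := List.drop_eq_nil_of_le (by omega)
      simp only [pvBRightAux]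
      rw [if_neg hj]
      simp [this]

-- B's right scan followed by the take yields exactly the leading digit run
theorem bright_run (R : List Char) :
    R.take (pvBRight R 0) = R.takeWhile Char.isDigit := by
  rw [pvBRight, pvBRightAux_eq R (R.length - 0) 0 (by omega)]
  simp only [Nat.zero_add, List.drop_zero]
  exact ((List.prefix_iff_eq_take.mp (List.takeWhile_prefix _)).symm)

-- headD / getLastD through pyGet? for a nonempty list
theorem pyGet?_head (xs : List Int) (h : xs ≠ []) :
    PySem.List.pyGet? xs 0 = some (xs.headD 0) := by
  cases xs with
  | nil => exact absurd rfl h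
  | cons a t => simp

theorem pyGet?_last (xs : List Int) (h : xs ≠ []) :
    PySem.List.pyGet? xs (-1) = some (xs.getLastD 0) := by
  rw [PySem.List.pyGet?_neg_one]
  cases hx : xs.getLast? with
  | none => exact absurd (List.getLast?_eq_none_iff.mp hx) h
  | some y =>
    have : xs.getLastD 0 = y := by rw [List.getLastD_eq_getLast?, hx]; rfl
    rw [this]

-- the left piece: A's backward walk equals B's slice-trailing-run, outside the left wrap region
theorem pv_left_eq (cs : List Char) (i0 : Int)
    (hpl : i0 = 0 ∨ (-(cs.length : Int) ≤ i0 - 1 ∧ i0 - 1 < (cs.length : Int)))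
    (hnl : ¬ (i0 < 0 ∧ -(cs.length : Int) ≤ i0 - 1 ∧
      (cs.getD ((cs.length : Int) + i0 - 1).toNat ' ').isDigit = true)) :
    (if i0 ≠ 0 then
      match PySem.List.pyGet? cs (i0 - 1) with
      | none => []
      | some c =>
        if c.isDigit then
          if i0 - 1 < 0 then []
          else pvLeftLoop cs (i0 - 1).toNat []
        else []
    else []) =
    (PySem.List.slice cs none (some i0)).drop
      (pvBLeft (PySem.List.slice cs none (some i0)) (PySem.List.slice cs none (some i0)).length) := by
  rcases lt_trichotomy i0 0 with hlt | heq | hgt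
  · -- negative first index: A probes the wrapped char and its walk never starts
    obtain ⟨hlo, _⟩ := hpl.resolve_left (by omega)
    have hk : i0 = -(((-i0).toNat : Nat) : Int) := by omega
    set k : Nat := (-i0).toNat with hkdef
    have hk1 : 1 ≤ k := by omega
    have hkn : k + 1 ≤ cs.length := by omega
    set m : Nat := cs.length - k with hm
    have hm1 : 1 ≤ m := by omega
    have hslice : PySem.List.slice cs none (some i0) = cs.take m := by
      rw [hk, PySem.List.slice_to_neg_natCast cs k (by omega)]
    have hg : PySem.List.pyGet? cs (i0 - 1) = some cs[m - 1] := by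
      have : i0 - 1 = -(((k + 1 : Nat) : Int)) := by omega
      rw [this, PySem.List.pyGet?_neg_natCast cs (k+1) (by omega) hkn]
      have : cs.length - (k + 1) = m - 1 := by omega
      rw [this, List.getElem?_eq_getElem (by omega)]
    have hd : ¬ cs[m - 1].isDigit = true := by
      intro hdig
      apply hnl
      refine ⟨hlt, hlo, ?_⟩
      have : ((cs.length : Int) + i0 - 1).toNat = m - 1 := by omega
      rw [this, List.getD_eq_getElem cs ' ' (by omega)]
      exact hdig
    rw [if_pos (by omega), hslice, bleft_run]
    simp only [hg]
    rw [if_neg hd]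
    have hsplit : (cs.take m).reverse = cs[m - 1] :: (cs.take (m - 1)).reverse := by
      conv_lhs => rw [show m = (m - 1) + 1 from by omega]
      rw [List.take_add_one, List.getElem?_eq_getElem (by omega : m - 1 < cs.length)]
      simp
    rw [hsplit]
    simp [List.takeWhile, hd]
  · -- first index 0: both sides contribute nothing
    have hslice : PySem.List.slice cs none (some i0) = cs.take 0 := by
      rw [heq, show (0 : Int) = ((0 : Nat) : Int) from rfl, PySem.List.slice_to_natCast]
    rw [hslice]
    simp [heq, pvBLeft]
  · -- positive first index: A walks back over exactly the trailing digit run of the slice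
    obtain ⟨_, hhi⟩ := hpl.resolve_left (by omega)
    set a : Nat := i0.toNat with hadef
    have ha : i0 = (a : Int) := by omega
    have ha1 : 1 ≤ a := by omega
    have han : a ≤ cs.length := by omega
    have hslice : PySem.List.slice cs none (some i0) = cs.take a := by
      rw [ha, PySem.List.slice_to_natCast]
    have hg : PySem.List.pyGet? cs (i0 - 1) = some cs[a - 1] := by
      have : i0 - 1 = ((a - 1 : Nat) : Int) := by omega
      rw [this]
      simpa using PySem.List.pyGet?_ofNat (xs := cs) (n := a - 1) (by omega)
    have hsplit : (cs.take a).reverse = cs[a - 1] :: (cs.take (a - 1)).reverse := by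
      conv_lhs => rw [show a = (a - 1) + 1 from by omega]
      rw [List.take_add_one, List.getElem?_eq_getElem (by omega : a - 1 < cs.length)]
      simp
    rw [if_pos (by omega), hslice, bleft_run]
    simp only [hg]
    by_cases hd : cs[a - 1].isDigit
    · rw [if_pos hd, if_neg (by omega : ¬ i0 - 1 < 0)]
      have htn : (i0 - 1).toNat = a - 1 := by omega
      rw [htn, pvLeftLoop_eq cs (a - 1) (by omega) []]
      rw [show (a - 1) + 1 = a from by omega]
      simp
    · rw [if_neg hd, hsplit]
      simp [List.takeWhile, hd]

-- the right piece: A's forward walk equals B's slice-leading-run, outside the right wrap region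
theorem pv_right_eq (cs : List Char) (i1 : Int)
    (hpr : i1 = (cs.length : Int) - 1 ∨ (-(cs.length : Int) ≤ i1 + 1 ∧ i1 + 1 < (cs.length : Int)))
    (hnr : ¬ (i1 + 1 < 0 ∧ -(cs.length : Int) ≤ i1 + 1 ∧
      (cs.drop ((cs.length : Int) + i1 + 1).toNat).all Char.isDigit = true ∧
      (cs.headD ' ').isDigit = true)) :
    (if i1 ≠ (cs.length : Int) - 1 then
      match PySem.List.pyGet? cs (i1 + 1) with
      | none => []
      | some c =>
        if c.isDigit then pvRightLoop cs (cs.length : Int) (((cs.length : Int) - (i1 + 1)).toNat + 1) (i1 + 1) []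
        else []
    else []) =
    (PySem.List.slice cs (some (i1 + 1)) none).take (pvBRight (PySem.List.slice cs (some (i1 + 1)) none) 0) := by
  by_cases hlast : i1 = (cs.length : Int) - 1
  · -- last index at the end of the line: both sides contribute nothing
    have hslice : PySem.List.slice cs (some (i1 + 1)) none = cs.drop cs.length := by
      rw [hlast]
      rw [show (cs.length : Int) - 1 + 1 = ((cs.length : Nat) : Int) from by omega]
      rw [PySem.List.slice_from_natCast]
    rw [hslice, List.drop_length]
    simp [hlast, pvBRight]
  · rcases lt_trichotomy (i1 + 1) 0 with hlt | heq0 | hgt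
    · -- negative start: A wraps; outside D_ the wrapped walk still equals B's leading run
      obtain ⟨hlo, _⟩ := hpr.resolve_left hlast
      have hn1 : 1 ≤ cs.length := by omega
      set k : Nat := (-(i1 + 1)).toNat with hkdef
      have hk : i1 + 1 = -((k : Nat) : Int) := by omega
      have hk1 : 1 ≤ k := by omega
      have hkn : k ≤ cs.length := by omega
      set w : Nat := cs.length - k with hw
      have hwn : w < cs.length := by omega
      have hslice : PySem.List.slice cs (some (i1 + 1)) none = cs.drop w := by
        rw [hk, PySem.List.slice_from_neg_natCast cs k (by omega)]
      have hg : PySem.List.pyGet? cs (i1 + 1) = some cs[w] := by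
        rw [hk, PySem.List.pyGet?_neg_natCast cs k (by omega) hkn]
        rw [show cs.length - k = w from rfl, List.getElem?_eq_getElem hwn]
      have hwt : ((cs.length : Int) + (i1 + 1)).toNat = w := by omega
      rw [if_pos hlast, hslice, bright_run]
      simp only [hg]
      by_cases hd : cs[w].isDigit
      · rw [if_pos hd]
        rw [pvRightLoopNeg cs _ (i1 + 1) [] (by omega) hlt (by omega)]
        rw [hwt]
        simp only [List.nil_append]
        -- outside D_: either the suffix run stops early, or the line does not start with a digit
        cases hall : (cs.drop w).all Char.isDigit with
        | false => rw [tw_append_not_all _ _ _ hall]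
        | true =>
          have hh : ¬ (cs.headD ' ').isDigit = true := by
            intro hdig
            have hwt2 : ((cs.length : Int) + i1 + 1).toNat = w := by omega
            exact hnr ⟨by omega, by omega, by rw [hwt2]; exact hall, hdig⟩
          rw [tw_append_all _ _ _ hall]
          have hcs0 : cs.takeWhile Char.isDigit = [] := by
            cases hcase : cs with
            | nil => simp
            | cons c rest =>
              have : ¬ c.isDigit = true := by rw [hcase] at hh; simpa using hh
              simp [List.takeWhile_cons, this]
          rw [hcs0, (List.takeWhile_eq_self_iff).mpr (by simpa using List.all_eq_true.mp hall)]
          simp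
      · rw [if_neg hd]
        have hdrop : cs.drop w = cs[w] :: cs.drop (w + 1) := List.drop_eq_getElem_cons hwn
        rw [hdrop]
        simp [List.takeWhile, hd]
    · -- start at position 0 (last index -1 on a nonempty line): A reads the whole line
      obtain ⟨_, hhi⟩ := hpr.resolve_left hlast
      have hslice : PySem.List.slice cs (some (i1 + 1)) none = cs.drop 0 := by
        rw [heq0, show (0 : Int) = ((0 : Nat) : Int) from rfl, PySem.List.slice_from_natCast]
      have hg : PySem.List.pyGet? cs (i1 + 1) = some cs[0] := by
        rw [heq0]
        simpa using PySem.List.pyGet?_ofNat (xs := cs) (n := 0) (by omega)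
      rw [if_pos hlast, hslice, bright_run]
      simp only [hg]
      by_cases hd : cs[0].isDigit
      · rw [if_pos hd]
        rw [heq0, show (0 : Int) = Int.ofNat 0 from rfl,
          pvRightLoop_eq cs _ 0 (by simp only [Int.ofNat_eq_natCast, Nat.cast_zero]; omega) []]
        simp
      · rw [if_neg hd]
        have hdrop : cs.drop 0 = cs[0] :: cs.drop 1 := List.drop_eq_getElem_cons (by omega)
        rw [hdrop]
        simp [List.takeWhile, hd]
    · -- positive start strictly inside the line
      obtain ⟨_, hhi⟩ := hpr.resolve_left hlast
      set w : Nat := (i1 + 1).toNat with hwdef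
      have hw : i1 + 1 = ((w : Nat) : Int) := by omega
      have hwn : w < cs.length := by omega
      have hslice : PySem.List.slice cs (some (i1 + 1)) none = cs.drop w := by
        rw [hw, PySem.List.slice_from_natCast]
      have hg : PySem.List.pyGet? cs (i1 + 1) = some cs[w] := by
        rw [hw]
        simpa using PySem.List.pyGet?_ofNat (xs := cs) (n := w) hwn
      rw [if_pos hlast, hslice, bright_run]
      simp only [hg]
      by_cases hd : cs[w].isDigit
      · rw [if_pos hd]
        rw [hw, show ((w : Nat) : Int) = Int.ofNat w from rfl,
          pvRightLoop_eq cs _ w (by simp only [Int.ofNat_eq_natCast]; omega) []]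
        simp
      · rw [if_neg hd]
        have hdrop : cs.drop w = cs[w] :: cs.drop (w + 1) := List.drop_eq_getElem_cons hwn
        rw [hdrop]
        simp [List.takeWhile, hd]

-- ===== VERDICT (by name: the statement is the Claim_ definition above) =====
theorem check_indices_on_same_line_spec : Claim_unchanged_check_indices_on_same_line := by
  intro indices line _hdom hpre
  unfold Spec_check_indices_on_same_line
  intro hnd
  obtain ⟨hne, hpl, hpr⟩ := hpre
  unfold D_check_indices_on_same_line at hnd
  rw [not_or] at hnd
  obtain ⟨hnl, hnr⟩ := hnd
  unfold check_indices_on_same_line check_indices_on_same_line_alt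
  rw [pyGet?_head indices hne, pyGet?_last indices hne]
  simp only [Option.getD_some]
  set cs := line.toList with hcs
  set i0 := indices.headD 0 with hi0
  set i1 := indices.getLastD 0 with hi1
  rw [pv_left_eq cs i0 hpl hnl, pv_right_eq cs i1 hpr hnr]
  simp

theorem check_indices_on_same_line_changed : Claim_changed_check_indices_on_same_line := by
  unfold Claim_changed_check_indices_on_same_line; decide

theorem check_indices_on_same_line_tight : Claim_exact_check_indices_on_same_line := by
  intro indices line _hdom hpre hD
  obtain ⟨hne, hpl, hpr⟩ := hpre
  unfold D_check_indices_on_same_line at hD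
  unfold check_indices_on_same_line check_indices_on_same_line_alt
  rw [pyGet?_head indices hne, pyGet?_last indices hne]
  simp only [Option.getD_some]
  set cs := line.toList with hcs
  set i0 := indices.headD 0 with hi0
  set i1 := indices.getLastD 0 with hi1
  have hfdot : String.ofList ['.'] = "." := by decide
  by_cases hDl : (i0 < 0 ∧ -(cs.length : Int) ≤ i0 - 1 ∧
      (cs.getD ((cs.length : Int) + i0 - 1).toNat ' ').isDigit = true)
  · -- left wrap region: A's left run is empty, B's left run is a nonempty digit run
    obtain ⟨hlt, hlo, hdig⟩ := hDl
    have hLA :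
        (if i0 ≠ 0 then
          match PySem.List.pyGet? cs (i0 - 1) with
          | none => []
          | some c =>
            if c.isDigit then
              if i0 - 1 < 0 then []
              else pvLeftLoop cs (i0 - 1).toNat []
            else []
        else []) = ([] : List Char) := by
      rw [if_pos (by omega : ¬ i0 = 0)]
      cases h : PySem.List.pyGet? cs (i0 - 1) with
      | none => rfl
      | some c =>
        show (if c.isDigit then
          if i0 - 1 < 0 then []
          else pvLeftLoop cs (i0 - 1).toNat [] else []) = ([] : List Char)
        by_cases hc : c.isDigit
        · rw [if_pos hc, if_pos (show i0 - 1 < 0 by omega)]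
        · rw [if_neg hc]
    rw [hLA]
    set k : Nat := (-i0).toNat with hkdef
    have hk : i0 = -((k : Nat) : Int) := by omega
    set m : Nat := cs.length - k with hm
    have hm1 : 1 ≤ m := by omega
    have hmn : m ≤ cs.length := by omega
    have hslice : PySem.List.slice cs none (some i0) = cs.take m := by
      rw [hk, PySem.List.slice_to_neg_natCast cs k (by omega)]
    rw [hslice, bleft_run]
    have hsplit : (cs.take m).reverse = cs[m - 1] :: (cs.take (m - 1)).reverse := by
      conv_lhs => rw [show m = (m - 1) + 1 from by omega]
      rw [List.take_add_one, List.getElem?_eq_getElem (by omega : m - 1 < cs.length)]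
      simp
    have hdm : cs[m - 1].isDigit = true := by
      have : ((cs.length : Int) + i0 - 1).toNat = m - 1 := by omega
      rw [this, List.getD_eq_getElem cs ' ' (by omega)] at hdig
      exact hdig
    have htw : ((cs.take m).reverse.takeWhile Char.isDigit)
        = cs[m - 1] :: ((cs.take (m - 1)).reverse.takeWhile Char.isDigit) := by
      rw [hsplit, List.takeWhile_cons, if_pos hdm]
    rw [htw]
    set tw' := (cs.take (m - 1)).reverse.takeWhile Char.isDigit with htw'
    -- B's left run ends with the digit cs[m-1]; its head is some digit d
    have hLne : (cs[m - 1] :: tw').reverse ≠ [] := by simp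
    cases hL : (cs[m - 1] :: tw').reverse with
    | nil => exact absurd hL hLne
    | cons d rest =>
      have hdmem : d ∈ cs[m - 1] :: tw' := by
        have : d ∈ (cs[m - 1] :: tw').reverse := by rw [hL]; simp
        exact List.mem_reverse.mp this
      have hddig : d.isDigit = true := by
        rcases List.mem_cons.mp hdmem with h | h
        · rw [h]; exact hdm
        · exact List.mem_takeWhile_imp h
      intro heq
      have hh := congrArg (fun l => l.head?) heq
      simp at hh
      have := congrArg String.toList hh
      simp at this
      rw [← this] at hddig
      simp at hddig
  · -- right wrap region (left pieces agree): A's wrapped run is strictly longer than B's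
    have hDr := hD.resolve_left hDl
    obtain ⟨hneg, hlo, hall, hhead⟩ := hDr
    rw [pv_left_eq cs i0 hpl hDl]
    have hn1 : 1 ≤ cs.length := by omega
    have hlast : i1 ≠ (cs.length : Int) - 1 := by omega
    set k : Nat := (-(i1 + 1)).toNat with hkdef
    have hk : i1 + 1 = -((k : Nat) : Int) := by omega
    have hk1 : 1 ≤ k := by omega
    have hkn : k ≤ cs.length := by omega
    set w : Nat := cs.length - k with hw
    have hwn : w < cs.length := by omega
    have hdropw : cs.drop w = cs[w] :: cs.drop (w + 1) := List.drop_eq_getElem_cons hwn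
    have hallw : (cs.drop w).all Char.isDigit = true := by
      have : ((cs.length : Int) + i1 + 1).toNat = w := by omega
      rw [this] at hall
      exact hall
    have hdw : cs[w].isDigit = true := by
      have := List.all_eq_true.mp hallw cs[w] (by rw [hdropw]; exact List.mem_cons_self ..)
      simpa using this
    have hg : PySem.List.pyGet? cs (i1 + 1) = some cs[w] := by
      rw [hk, PySem.List.pyGet?_neg_natCast cs k (by omega) hkn]
      rw [show cs.length - k = w from rfl, List.getElem?_eq_getElem hwn]
    have hslice : PySem.List.slice cs (some (i1 + 1)) none = cs.drop w := by
      rw [hk, PySem.List.slice_from_neg_natCast cs k (by omega)]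
    have hRA :
        (if i1 ≠ (cs.length : Int) - 1 then
          match PySem.List.pyGet? cs (i1 + 1) with
          | none => []
          | some c =>
            if c.isDigit then pvRightLoop cs (cs.length : Int) (((cs.length : Int) - (i1 + 1)).toNat + 1) (i1 + 1) []
            else []
        else []) = cs.drop w ++ cs.takeWhile Char.isDigit := by
      rw [if_pos hlast]
      simp only [hg]
      rw [if_pos hdw]
      rw [pvRightLoopNeg cs _ (i1 + 1) [] (by omega) (by omega) (by omega)]
      have : ((cs.length : Int) + (i1 + 1)).toNat = w := by omega
      rw [this, tw_append_all _ _ _ hallw]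
      simp
    have hRB : (PySem.List.slice cs (some (i1 + 1)) none).take
        (pvBRight (PySem.List.slice cs (some (i1 + 1)) none) 0) = cs.drop w := by
      rw [hslice, bright_run]
      exact (List.takeWhile_eq_self_iff).mpr (by simpa using List.all_eq_true.mp hallw)
    rw [hRA, hRB]
    -- the whole-line run cs.takeWhile is nonempty because cs starts with a digit
    obtain ⟨c0, r, hcase⟩ := List.exists_cons_of_ne_nil
      (List.ne_nil_of_length_pos (by omega : 0 < cs.length))
    have hc0 : c0.isDigit = true := by rw [hcase] at hhead; simpa using hhead
    have htw0 : cs.takeWhile Char.isDigit = c0 :: (r.takeWhile Char.isDigit) := by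
      rw [hcase, List.takeWhile_cons, if_pos hc0]
    intro heq
    have hlen := congrArg List.length heq
    rw [htw0] at hlen
    simp [List.length_append, List.length_map] at hlen
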